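-- pv_equiv track=rewrite | github.com/ramjan-raeen/Python-Programe | tcsTestCode.py | removeConsonant
-- ===== SOURCE A (Python) =====
-- def removeConsonant(word):
--     consonant='bcdfghjklmnpqrstvwxyz'
--     Consonant='BCDFGHJKLMNPQRSTVWXYZ'
--     newWord=''
--     for letter in word :
--         if letter in consonant or letter in Consonant :
--             con=letter.replace(letter,'#')
--         else:
--             con=letter
--         newWord+=con
--     return newWord
-- ===== SOURCE B (Python) =====
-- def removeConsonant(word):
--     table = {ord(c): '#' for c in 'bcdfghjklmnpqrstvwxyz' + 'BCDFGHJKLMNPQRSTVWXYZ'}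
--     return word.translate(table)
-- ===== Notes on version B (the rewrite author's own statement) =====
-- stated objective: idiomatic
-- what changed: Replaces the explicit loop with per-character substring membership tests and string concatenation by a precomputed translation table (dict over the 42 consonant codepoints) applied in one str.translate pass.
import Mathlib
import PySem

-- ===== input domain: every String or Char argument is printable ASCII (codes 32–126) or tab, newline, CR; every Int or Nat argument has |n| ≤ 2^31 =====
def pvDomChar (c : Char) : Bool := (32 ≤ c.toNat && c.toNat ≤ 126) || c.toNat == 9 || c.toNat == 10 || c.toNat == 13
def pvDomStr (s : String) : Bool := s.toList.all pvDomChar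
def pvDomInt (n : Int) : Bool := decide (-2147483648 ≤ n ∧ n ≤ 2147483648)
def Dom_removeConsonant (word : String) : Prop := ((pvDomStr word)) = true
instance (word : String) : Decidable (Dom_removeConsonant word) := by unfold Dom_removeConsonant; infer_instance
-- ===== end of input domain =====

-- B replaces A's explicit loop/branch with a precomputed consonant→'#' translation table
-- applied in a single pass (idiomatic str.translate); return values proved equal on Dom.

-- ===== PORT A =====
-- 'letter in consonant' for the single char letter is char membership in the string;
-- letter.replace(letter,'#') is '#'. The loop accumulates newWord by appending each con.
def removeConsonant (word : String) : String :=
  let consonant := "bcdfghjklmnpqrstvwxyz"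
  let consonantU := "BCDFGHJKLMNPQRSTVWXYZ"
  String.mk (word.toList.foldl
    (fun newWord letter =>
      newWord ++ [if consonant.toList.contains letter || consonantU.toList.contains letter
                  then '#' else letter]) [])

-- ===== PORT B =====
-- the dict comprehension {ord(c): '#' for c in ...}; keys are kept as Char (ord is a
-- bijection onto codepoints, so lookup by char is exact), then translate maps each char
-- through the table, keeping chars with no entry.
def removeConsonant_alt (word : String) : String :=
  let table : PySem.Dict Char Char :=
    ("bcdfghjklmnpqrstvwxyz" ++ "BCDFGHJKLMNPQRSTVWXYZ").toList.foldl
      (fun d c => d.insert c '#') PySem.Dict.empty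
  String.mk (word.toList.map (fun c => table.getD c c))

-- ===== PRECONDITION & SPEC =====
def Spec_removeConsonant (word : String) (out : String) : Prop := out = removeConsonant_alt word
instance (word : String) (out : String) : Decidable (Spec_removeConsonant word out) := by unfold Spec_removeConsonant; infer_instance

-- ===== CLAIM (what is proved, stated in full; the proofs are below) =====
def Claim_equal_removeConsonant : Prop := ∀ (word : String), Dom_removeConsonant word → Spec_removeConsonant word (removeConsonant word)

-- ===== LEMMAS AND PROOFS =====

theorem foldl_append_singleton {α β : Type} (f : α → β) :
    ∀ (l : List α) (acc : List β),
      l.foldl (fun a c => a ++ [f c]) acc = acc ++ l.map f := by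
  intro l
  induction l with
  | nil => intro acc; simp
  | cons x xs ih => intro acc; simp [List.foldl, ih]

theorem getD_foldl_insert_const (c : Char) :
    ∀ (l : List Char) (d : PySem.Dict Char Char),
      (l.foldl (fun d k => d.insert k '#') d).getD c c =
        if l.contains c then '#' else d.getD c c := by
  intro l
  induction l with
  | nil => intro d; simp
  | cons k ks ih =>
      intro d
      simp only [List.foldl, ih, PySem.Dict.getD_insert]
      by_cases hk : c = k
      · simp [hk]
      · simp [hk]

set_option maxRecDepth 8000 in
theorem removeConsonant_spec : Claim_equal_removeConsonant := by
  unfold Claim_equal_removeConsonant Spec_removeConsonant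
  intro word _
  simp only [removeConsonant, removeConsonant_alt]
  rw [foldl_append_singleton]
  simp only [List.nil_append]
  congr 1
  apply List.map_congr_left
  intro c _
  rw [getD_foldl_insert_const]
  simp [or_assoc]
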